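-- pv_equiv track=rewrite | github.com/vmkmym/Algorithm | 프로그래머스/unrated/181874. A 강조하기/A 강조하기.py | solution
-- ===== SOURCE A (Python) =====
-- def solution(myString):
--     answer = ''
--
--     for char in myString:
--         if char == "a":
--             answer += "A"
--         elif char != "A" and char.isupper():
--             answer += char.lower()
--         else:
--             answer += char
--
--     return answer
-- ===== SOURCE B (Python) =====
-- def solution(myString):
--     return myString.lower().replace('a', 'A')
-- ===== Notes on version B (the rewrite author's own statement) =====
-- stated objective: idiomatic
-- what changed: Replaced the per-character loop and branching with two whole-string library passes, str.lower() followed by str.replace, which compose to the same character mapping.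
import Mathlib
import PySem

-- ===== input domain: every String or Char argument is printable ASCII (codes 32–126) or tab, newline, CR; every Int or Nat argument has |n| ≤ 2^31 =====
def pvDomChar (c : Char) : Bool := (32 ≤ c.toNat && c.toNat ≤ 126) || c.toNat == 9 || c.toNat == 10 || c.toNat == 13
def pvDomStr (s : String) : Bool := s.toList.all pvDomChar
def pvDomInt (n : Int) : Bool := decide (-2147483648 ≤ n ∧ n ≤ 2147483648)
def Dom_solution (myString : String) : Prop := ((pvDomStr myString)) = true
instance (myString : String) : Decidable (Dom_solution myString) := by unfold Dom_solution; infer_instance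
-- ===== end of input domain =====

-- B replaces A's per-character loop with two whole-string passes: lower() then replace('a','A') (idiomatic).


-- ===== PORT A =====
-- literal transliteration: loop over characters, building 'answer' with the three branches
def solution (myString : String) : String :=
  myString.toList.foldl
    (fun answer char =>
      if char == 'a' then answer ++ "A"
      else if char != 'A' && PySem.Chars.isupper char then answer ++ String.ofList [PySem.Chars.lowerChar char]
      else answer ++ String.ofList [char])
    ""

-- ===== PORT B =====
def solution_alt (myString : String) : String :=
  PySem.Str.replace (PySem.Str.lower myString) "a" "A"

-- ===== PRECONDITION & SPEC =====
def Spec_solution (myString : String) (out : String) : Prop := out = solution_alt myString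
instance (myString : String) (out : String) : Decidable (Spec_solution myString out) := by unfold Spec_solution; infer_instance

-- ===== CLAIM (what is proved, stated in full; the proofs are below) =====
def Claim_equal_solution : Prop := ∀ (myString : String), Dom_solution myString → Spec_solution myString (solution myString)

-- ===== LEMMAS AND PROOFS =====

-- the character map A's loop applies
def pvStepA (c : Char) : Char :=
  if c == 'a' then 'A'
  else if c != 'A' && PySem.Chars.isupper c then PySem.Chars.lowerChar c
  else c

lemma replace_single_go (a b : Char) (l acc : List Char) (fuel : Nat) (h : l.length ≤ fuel) :
    PySem.Chars.replace.go [a] [b] fuel l acc =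
      acc.reverse ++ l.map (fun c => if c == a then b else c) := by
  induction l generalizing fuel acc with
  | nil => cases fuel <;> simp [PySem.Chars.replace.go]
  | cons c t ih =>
    cases fuel with
    | zero => simp at h
    | succ n =>
      simp only [List.length_cons, Nat.succ_le_succ_iff] at h
      simp only [PySem.Chars.replace.go, List.isPrefixOf]
      by_cases hc : c = a
      · simp [hc, ih _ _ h]
      · have : (a == c) = false := by simp [Ne.symm hc]
        simp [this, ih _ _ h, hc]

lemma replace_single (a b : Char) (l : List Char) :
    PySem.Chars.replace l [a] [b] = l.map (fun c => if c == a then b else c) := by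
  simp [PySem.Chars.replace, replace_single_go a b l [] l.length le_rfl]

lemma foldA_toList (cs : List Char) (s : String) :
    (cs.foldl
      (fun answer char =>
        if char == 'a' then answer ++ "A"
        else if char != 'A' && PySem.Chars.isupper char then answer ++ String.ofList [PySem.Chars.lowerChar char]
        else answer ++ String.ofList [char])
      s).toList = s.toList ++ cs.map pvStepA := by
  induction cs generalizing s with
  | nil => simp
  | cons c t ih =>
    simp only [List.foldl_cons]
    rw [ih]
    simp only [pvStepA, List.map_cons]
    by_cases h1 : c = 'a'
    · simp [h1]
    · by_cases h2 : c != 'A' && PySem.Chars.isupper c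
      · simp [h1, h2]
      · simp [h1, h2]

lemma step_eq (c : Char) : pvStepA c = if PySem.Chars.lowerChar c == 'a' then 'A' else PySem.Chars.lowerChar c := by
  unfold pvStepA PySem.Chars.lowerChar PySem.Chars.isupper
  by_cases h1 : c = 'a'
  · subst h1; decide
  · by_cases h2 : c = 'A'
    · subst h2; decide
    · by_cases ha : 'A' ≤ c
      · by_cases hz : c ≤ 'Z'
        · have hlo : 65 ≤ c.toNat := ha
          have hhi : c.toNat ≤ 90 := hz
          have hv : (c.toNat + 32).isValidChar := Or.inl (by omega)
          have hne : Char.ofNat (c.toNat + 32) ≠ 'a' := by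
            intro he
            have h97 := congrArg Char.toNat he
            rw [Char.toNat_ofNat, if_pos hv] at h97
            have h65 : c.toNat = ('A' : Char).toNat := by
              have e1 : ('a' : Char).toNat = 97 := by decide
              have e2 : ('A' : Char).toNat = 65 := by decide
              omega
            exact h2 (Char.ext (UInt32.toNat.inj h65))
          simp [h1, h2, ha, hz, hne]
        · simp [h1, ha, hz]
      · simp [h1, ha]

-- ===== VERDICT (by name: the statement is the Claim_ definition above) =====
theorem solution_spec : Claim_equal_solution := by
  intro s _
  show solution s = solution_alt s
  have hA := foldA_toList s.toList ""
  have hB : (solution_alt s).toList =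
      s.toList.map (fun c => if PySem.Chars.lowerChar c == 'a' then 'A' else PySem.Chars.lowerChar c) := by
    simp only [solution_alt, PySem.Str.toList_replace, PySem.Str.toList_lower]
    rw [show ("a" : String).toList = ['a'] from rfl, show ("A" : String).toList = ['A'] from rfl]
    rw [replace_single, PySem.Chars.lower, List.map_map]
    rfl
  have : (solution s).toList = (solution_alt s).toList := by
    rw [hB]
    simpa [solution, List.map_congr_left fun c _ => step_eq c] using hA
  exact String.toList_inj.mp this
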